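-- pv_equiv track=rewrite | github.com/olgarithms/advent_of_code_2019 | Day04/solution.py | check_two_same_adjacent
-- ===== SOURCE A (Python) =====
-- def check_two_same_adjacent(num):
--     last_digit = num[0]
--     group_len = 1
--     for i in num[1:]:
--         if i == last_digit:
--             group_len += 1
--         else:
--             if group_len == 2:
--                 return True
--             last_digit = i
--             group_len = 1
--     return group_len == 2
-- ===== SOURCE B (Python) =====
-- def check_two_same_adjacent(num):
--     n = len(num)
--     return any(
--         num[i] == num[i + 1]
--         and (i == 0 or num[i - 1] != num[i])
--         and (i + 2 == n or num[i + 2] != num[i])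
--         for i in range(n - 1)
--     )
-- ===== Notes on version B (the rewrite author's own statement) =====
-- stated objective: alternative
-- what changed: B drops A's stateful run-length counter with early return and instead tests each position directly: any index i with num[i] == num[i+1] whose neighbours on both sides (if any) differ.
import Mathlib
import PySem

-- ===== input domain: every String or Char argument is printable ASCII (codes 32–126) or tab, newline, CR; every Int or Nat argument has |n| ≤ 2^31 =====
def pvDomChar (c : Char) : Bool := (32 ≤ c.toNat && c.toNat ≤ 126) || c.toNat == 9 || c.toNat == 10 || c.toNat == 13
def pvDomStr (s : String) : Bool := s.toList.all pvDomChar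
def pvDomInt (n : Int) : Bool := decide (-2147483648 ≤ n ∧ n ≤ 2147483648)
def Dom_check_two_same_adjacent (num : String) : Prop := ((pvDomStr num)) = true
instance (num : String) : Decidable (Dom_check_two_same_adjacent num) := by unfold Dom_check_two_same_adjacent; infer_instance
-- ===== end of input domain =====

-- B replaces A's stateful run-length counter (last_digit/group_len with early return) by a
-- stateless positional test: some index i has num[i] == num[i+1] with differing neighbours on
-- both sides (alternative decomposition, same O(n) cost).

-- ===== PORT A =====
-- the for-loop over num[1:] with state (last_digit, group_len) and early return
def pvLoopA : Char → Nat → List Char → Bool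
  | _, group_len, [] => group_len == 2
  | last_digit, group_len, i :: rest =>
    if i == last_digit then pvLoopA last_digit (group_len + 1) rest
    else if group_len == 2 then true
    else pvLoopA i 1 rest

def check_two_same_adjacent (num : String) : Bool :=
  match num.toList with
  | [] => false            -- num[0] raises IndexError in Python; excluded by Pre_
  | c :: rest => pvLoopA c 1 rest

-- ===== PORT B =====
-- any(num[i] == num[i+1] and (i == 0 or num[i-1] != num[i]) and (i+2 == n or num[i+2] != num[i])
--     for i in range(n-1)); all indices reached are in range, so getD is exact; the i-1 and i+2
-- accesses are guarded by the short-circuit '||' exactly as Python's 'or' guards them.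
def check_two_same_adjacent_alt (num : String) : Bool :=
  let l := num.toList
  let n := l.length
  (List.range (n - 1)).any (fun i =>
    (l.getD i ' ' == l.getD (i + 1) ' ') &&
    (decide (i = 0) || !(l.getD (i - 1) ' ' == l.getD i ' ')) &&
    (decide (i + 2 = n) || !(l.getD (i + 2) ' ' == l.getD i ' ')))

-- ===== PRECONDITION & SPEC =====
-- Pre_ excludes only the empty string, on which A raises IndexError (num[0]).
def Pre_check_two_same_adjacent (num : String) : Prop := num ≠ ""
instance (num : String) : Decidable (Pre_check_two_same_adjacent num) := by
  unfold Pre_check_two_same_adjacent; infer_instance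

def pvWitness_check_two_same_adjacent : String := "112"

def Spec_check_two_same_adjacent (num : String) (out : Bool) : Prop := out = check_two_same_adjacent_alt num
instance (num : String) (out : Bool) : Decidable (Spec_check_two_same_adjacent num out) := by
  unfold Spec_check_two_same_adjacent; infer_instance

-- ===== CLAIM (what is proved, stated in full; the proofs are below) =====
def Claim_equal_check_two_same_adjacent : Prop := ∀ (num : String), Dom_check_two_same_adjacent num → Pre_check_two_same_adjacent num → Spec_check_two_same_adjacent num (check_two_same_adjacent num)

-- ===== LEMMAS AND PROOFS =====

-- run lengths of the maximal runs of equal characters: a proof-side characterisation of A's loop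
def pvRunGo : Char → Nat → List Char → List Nat
  | _, n, [] => [n]
  | c, n, x :: xs => if x == c then pvRunGo c (n + 1) xs else n :: pvRunGo x 1 xs

theorem pvLoopA_eq_runGo (l : List Char) :
    ∀ (c : Char) (n : Nat), pvLoopA c n l = (pvRunGo c n l).any (· == 2) := by
  induction l with
  | nil => intro c n; simp [pvLoopA, pvRunGo]
  | cons x xs ih =>
    intro c n
    by_cases h : x == c
    · simp [pvLoopA, pvRunGo, h, ih]
    · simp [pvLoopA, pvRunGo, h, ih]
      by_cases h2 : n = 2 <;> simp [h2]

-- structural version of B's window scan; pOK says whether a previous character p exists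
def pvWinGo : Bool → Char → List Char → Bool
  | _, _, [] => false
  | _, _, [_] => false
  | pOK, p, [a, b] => ((a == b) && (!pOK || !(p == a))) || pvWinGo true a [b]
  | pOK, p, a :: b :: c :: rest =>
    ((a == b) && (!pOK || !(p == a)) && !(c == a)) || pvWinGo true a (b :: c :: rest)

-- the indexed window body with explicit previous-character context
def pvWinBody (pOK : Bool) (p : Char) (l : List Char) (i : Nat) : Bool :=
  (l.getD i ' ' == l.getD (i + 1) ' ') &&
  (if i = 0 then (!pOK || !(p == l.getD 0 ' ')) else !(l.getD (i - 1) ' ' == l.getD i ' ')) &&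
  (decide (i + 2 = l.length) || !(l.getD (i + 2) ' ' == l.getD i ' '))

theorem pvWin_any (l : List Char) :
    ∀ (pOK : Bool) (p : Char),
      (List.range (l.length - 1)).any (pvWinBody pOK p l) = pvWinGo pOK p l := by
  induction l with
  | nil => intro pOK p; simp [pvWinGo]
  | cons a t ih =>
    intro pOK p
    cases t with
    | nil => simp [pvWinGo]
    | cons b rest =>
      have hshift : (pvWinBody pOK p (a :: b :: rest) ∘ Nat.succ) = pvWinBody true a (b :: rest) := by
        funext i
        cases i with
        | zero => simp [pvWinBody, List.getD]
        | succ j => simp [pvWinBody, List.getD]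
      have hlen : (a :: b :: rest).length - 1 = rest.length + 1 := by simp
      rw [hlen, List.range_succ_eq_map]
      simp only [List.any_cons, List.any_map, hshift]
      have hrec := ih true a
      have hlen2 : (b :: rest).length - 1 = rest.length := by simp
      rw [hlen2] at hrec
      rw [hrec]
      cases rest with
      | nil =>
        show (pvWinBody pOK p [a, b] 0 || pvWinGo true a [b]) = pvWinGo pOK p [a, b]
        have : pvWinBody pOK p [a, b] 0 = ((a == b) && (!pOK || !(p == a))) := by
          simp [pvWinBody, List.getD]
        rw [this]; rfl
      | cons c rs =>
        show (pvWinBody pOK p (a :: b :: c :: rs) 0 || pvWinGo true a (b :: c :: rs))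
            = pvWinGo pOK p (a :: b :: c :: rs)
        have : pvWinBody pOK p (a :: b :: c :: rs) 0
            = ((a == b) && (!pOK || !(p == a)) && !(c == a)) := by
          simp [pvWinBody, List.getD]
        rw [this]; rfl

-- skipping a repeated character does not change the window scan
theorem pvWinGo_skip (p : Char) (xs : List Char) :
    pvWinGo true p (p :: xs) = pvWinGo true p xs := by
  match xs with
  | [] => rfl
  | [b] => simp [pvWinGo]
  | b :: c :: r => simp [pvWinGo]

-- a fresh character resets the context
theorem pvWinGo_fresh (p x : Char) (xs : List Char) (h : (p == x) = false) :
    pvWinGo true p (x :: xs) = pvWinGo false ' ' (x :: xs) := by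
  match xs with
  | [] => rfl
  | [b] => simp [pvWinGo, h]
  | b :: c :: r => simp [pvWinGo, h]

-- joint strong induction: the window scan equals "some run has length exactly 2"
theorem pvWin_runs : ∀ (m : Nat),
    (∀ (l : List Char) (c : Char), l.length ≤ m →
      pvWinGo false ' ' (c :: l) = (pvRunGo c 1 l).any (· == 2)) ∧
    (∀ (l : List Char) (c : Char) (k : Nat), l.length ≤ m → 3 ≤ k →
      pvWinGo true c l = (pvRunGo c k l).any (· == 2)) := by
  intro m
  induction m with
  | zero =>
    constructor
    · intro l c hl
      have : l = [] := List.length_eq_zero_iff.mp (Nat.le_zero.mp hl)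
      subst this; simp [pvWinGo, pvRunGo]
    · intro l c k hl hk
      have : l = [] := List.length_eq_zero_iff.mp (Nat.le_zero.mp hl)
      subst this; simp [pvWinGo, pvRunGo]; omega
  | succ m ih =>
    have ihS := ih.1
    have ihT := ih.2
    constructor
    · -- S at level m+1
      intro l c hl
      cases l with
      | nil => simp [pvWinGo, pvRunGo]
      | cons x xs =>
        by_cases hx : (x == c) = true
        · have hcx : c = x := (beq_iff_eq.mp hx).symm
          subst hcx
          cases xs with
          | nil => simp [pvWinGo, pvRunGo]
          | cons d ys =>
            -- here the list is x :: x :: d :: ys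
            by_cases hd : (d == c) = true
            · have hdc : c = d := (beq_iff_eq.mp hd).symm
              subst hdc
              have h1 : pvWinGo false ' ' (c :: c :: c :: ys) = pvWinGo true c ys := by
                simp [pvWinGo]
                rw [pvWinGo_skip, pvWinGo_skip]
              have h2 : pvRunGo c 1 (c :: c :: ys) = pvRunGo c 3 ys := by
                simp [pvRunGo]
              rw [h1, h2]
              exact ihT ys c 3 (by simp at hl; omega) (by omega)
            · have h1 : pvWinGo false ' ' (c :: c :: d :: ys) = true := by
                simp [pvWinGo, hd]
              rw [h1]
              simp [pvRunGo, hd]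
        · have hcx : (c == x) = false := by
            simp [beq_iff_eq] at hx ⊢; exact fun h => hx h.symm
          have h1 : pvWinGo false ' ' (c :: x :: xs) = pvWinGo true c (x :: xs) := by
            cases xs with
            | nil => simp [pvWinGo, hcx]
            | cons b r => simp [pvWinGo, hcx]
          rw [h1, pvWinGo_fresh c x xs hcx]
          rw [show pvRunGo c 1 (x :: xs) = 1 :: pvRunGo x 1 xs by simp [pvRunGo, hx]]
          simp only [List.any_cons]
          rw [ihS xs x (Nat.le_of_succ_le_succ hl)]
          simp
    · -- T at level m+1
      intro l c k hl hk
      cases l with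
      | nil => simp [pvWinGo, pvRunGo]; omega
      | cons x xs =>
        by_cases hx : (x == c) = true
        · have hcx : c = x := (beq_iff_eq.mp hx).symm
          subst hcx
          rw [pvWinGo_skip]
          rw [show pvRunGo c k (c :: xs) = pvRunGo c (k + 1) xs from by simp [pvRunGo]]
          exact ihT xs c (k + 1) (Nat.le_of_succ_le_succ hl) (by omega)
        · have hcx : (c == x) = false := by
            simp [beq_iff_eq] at hx ⊢; exact fun h => hx h.symm
          rw [pvWinGo_fresh c x xs hcx]
          rw [show pvRunGo c k (x :: xs) = k :: pvRunGo x 1 xs by simp [pvRunGo, hx]]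
          simp only [List.any_cons]
          rw [ihS xs x (Nat.le_of_succ_le_succ hl)]
          have hk2 : (k == 2) = false := by simp; omega
          rw [hk2]; simp

-- ===== VERDICT =====
theorem check_two_same_adjacent_spec : Claim_equal_check_two_same_adjacent := by
  intro num _ hpre
  unfold Spec_check_two_same_adjacent check_two_same_adjacent check_two_same_adjacent_alt
  have hb : (fun i => (num.toList.getD i ' ' == num.toList.getD (i + 1) ' ') &&
      (decide (i = 0) || !(num.toList.getD (i - 1) ' ' == num.toList.getD i ' ')) &&
      (decide (i + 2 = num.toList.length) || !(num.toList.getD (i + 2) ' ' == num.toList.getD i ' ')))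
      = pvWinBody false ' ' num.toList := by
    funext i
    by_cases h0 : i = 0 <;> simp [pvWinBody, h0]
  simp only [hb, pvWin_any]
  cases h : num.toList with
  | nil => exact absurd (by simpa [String.toList_eq_nil_iff] using h) hpre
  | cons c rest =>
    show pvLoopA c 1 rest = pvWinGo false ' ' (c :: rest)
    rw [pvLoopA_eq_runGo]
    exact ((pvWin_runs rest.length).1 rest c (Nat.le_refl _)).symm
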